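-- pv_equiv track=rewrite | github.com/hmtmcse-exp/python | django/django_crud/django_crud/templatetags/ui_helper_extras.py | generate_pagination
-- ===== SOURCE A (Python) =====
-- def number_between(n, start, end):
--     if start < n <= end:
--         return True
--     else:
--         return False
--
-- def generate_pagination(total, current_offset, limit):
--     loop = int(total / limit)
--     modulus = total % limit
--     html = '<ul class="pagination">'
--     n = 0
--     offset = 0
--     for n in range(1, loop + 1):
--         if number_between(n * limit, current_offset, current_offset + limit):
--             html += '<li class="active"><a href="#">' + str(n) + '</a></li>'
--         else:
--             html += '<li><a href="?offset=' + str(offset) + '&limit=' + str(limit) + '">' + str(n) + '</a></li>'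
--         offset = offset + limit
--
--     if modulus != 0:
--         n += 1
--         if number_between(n * limit, current_offset, current_offset + limit):
--             html += '<li class="active"><a href="#">' + str(n) + '</a></li>'
--         else:
--             html += '<li><a href="?offset=' + str(offset) + '&limit=' + str(limit) + '">' + str(n) + '</a></li>'
--     return html
-- ===== SOURCE B (Python) =====
-- def generate_pagination(total, current_offset, limit):
--     pages = int(total / limit) + (1 if total % limit != 0 else 0)
--     items = ['<li><a href="?offset=' + str((n - 1) * limit) + '&limit=' + str(limit)
--              + '">' + str(n) + '</a></li>' for n in range(1, pages + 1)]
--     if limit > 0: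
--         a = current_offset // limit  # zero-based index of the unique active page
--         if 0 <= a < pages:
--             items[a] = '<li class="active"><a href="#">' + str(a + 1) + '</a></li>'
--     return '<ul class="pagination">' + ''.join(items)
-- ===== Notes on version B (the rewrite author's own statement) =====
-- stated objective: alternative
-- what changed: B is staged: it precomputes the page count, builds the list of all inactive links in one comprehension, then computes the active page's index arithmetically (current_offset // limit) and patches that single slot, replacing A's one-pass accumulator loop with a per-page interval test plus a duplicated post-loop remainder block.
-- intended difference: When total and limit have opposite signs, limit does not divide total and |limit| <= |total| (truncated page count negative with nonzero remainder), A's leftover loop variable n=0 makes its remainder block emit a spurious page-1 <li>; B emits the bare '<ul class="pagination">' with no items, the intended result for a nonpositive page count. — e.g. on generate_pagination(-5, 0, 2): A returns "<ul class=\"pagination\"><li class=\"active\"><a href=\"#\">1</a></li>", B returns "<ul class=\"pagination\">"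
import Mathlib
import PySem

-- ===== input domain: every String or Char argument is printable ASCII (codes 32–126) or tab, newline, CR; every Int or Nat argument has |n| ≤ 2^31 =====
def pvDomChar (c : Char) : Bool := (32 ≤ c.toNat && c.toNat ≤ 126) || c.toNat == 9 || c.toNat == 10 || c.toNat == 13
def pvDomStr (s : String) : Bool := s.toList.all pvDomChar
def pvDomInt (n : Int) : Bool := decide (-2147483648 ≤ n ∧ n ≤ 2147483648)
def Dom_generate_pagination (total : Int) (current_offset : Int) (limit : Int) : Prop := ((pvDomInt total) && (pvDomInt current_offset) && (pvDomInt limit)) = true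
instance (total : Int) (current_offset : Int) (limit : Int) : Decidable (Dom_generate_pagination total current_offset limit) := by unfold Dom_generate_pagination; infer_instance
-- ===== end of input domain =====

-- B stages the work: build all inactive links, then patch the single arithmetically
-- located active slot (objective: alternative); on the exceptional D_ inputs B
-- intentionally emits no items where A emits a spurious page-1 item (see D_ below).

-- ===== PORT A =====
def number_between (n : Int) (start : Int) («end» : Int) : Bool :=
  if start < n ∧ n ≤ «end» then true else false

-- loop body of A: state is (html, n, offset); the post-loop remainder block is this same code
-- applied to (html, n+1, offset), exactly as in the Python source.
def pvStepA (current_offset : Int) (limit : Int) (st : String × Int × Int) (n : Int) : String × Int × Int :=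
  let html :=
    if number_between (n * limit) current_offset (current_offset + limit) then
      st.1 ++ "<li class=\"active\"><a href=\"#\">" ++ PySem.Int.toStr n ++ "</a></li>"
    else
      st.1 ++ "<li><a href=\"?offset=" ++ PySem.Int.toStr st.2.2 ++ "&limit=" ++ PySem.Int.toStr limit ++ "\">" ++ PySem.Int.toStr n ++ "</a></li>"
  (html, n, st.2.2 + limit)

-- int(total / limit) is PySem.Int.truncdiv (exact: Dom bounds |total|,|limit| ≤ 2^31 < 2^53)
def generate_pagination (total : Int) (current_offset : Int) (limit : Int) : String :=
  let loop := PySem.Int.truncdiv total limit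
  let modulus := PySem.Int.mod total limit
  let st := (PySem.List.pyRange 1 (loop + 1)).foldl (pvStepA current_offset limit)
      ("<ul class=\"pagination\">", 0, 0)
  if modulus ≠ 0 then
    (pvStepA current_offset limit st (st.2.1 + 1)).1
  else st.1

-- ===== PORT B =====
def pvActiveItem (n : Int) : String :=
  "<li class=\"active\"><a href=\"#\">" ++ PySem.Int.toStr n ++ "</a></li>"

def pvInactiveItem (n : Int) (limit : Int) : String :=
  "<li><a href=\"?offset=" ++ PySem.Int.toStr ((n - 1) * limit) ++ "&limit=" ++ PySem.Int.toStr limit ++ "\">" ++ PySem.Int.toStr n ++ "</a></li>"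

def generate_pagination_alt (total : Int) (current_offset : Int) (limit : Int) : String :=
  let pages := PySem.Int.truncdiv total limit + (if PySem.Int.mod total limit ≠ 0 then 1 else 0)
  let items := (PySem.List.pyRange 1 (pages + 1)).map (fun n => pvInactiveItem n limit)
  let items :=
    if 0 < limit then
      let a := PySem.Int.floordiv current_offset limit
      if 0 ≤ a ∧ a < pages then items.set a.toNat (pvActiveItem (a + 1)) else items
    else items
  "<ul class=\"pagination\">" ++ String.join items

-- ===== PRECONDITION & SPEC =====
-- Pre_ excludes exactly limit = 0, where the Python A raises ZeroDivisionError.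
def Pre_generate_pagination (total : Int) (current_offset : Int) (limit : Int) : Prop :=
  limit ≠ 0
instance (total : Int) (current_offset : Int) (limit : Int) : Decidable (Pre_generate_pagination total current_offset limit) := by unfold Pre_generate_pagination; infer_instance

def pvWitness_generate_pagination : Int × Int × Int := (10, 4, 3)

-- When total and limit have opposite signs, limit does not divide total and |limit| ≤ |total|
-- (truncated page count negative with nonzero remainder), A's leftover loop variable n = 0 makes
-- its remainder block emit a spurious page-1 <li>; B emits the bare '<ul class="pagination">'
-- with no items, the intended result for a nonpositive page count.
def D_generate_pagination (total : Int) (current_offset : Int) (limit : Int) : Prop :=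
  ¬ (limit ∣ total) ∧ ((0 < total ∧ limit < 0) ∨ (total < 0 ∧ 0 < limit)) ∧ limit.natAbs ≤ total.natAbs
instance (total : Int) (current_offset : Int) (limit : Int) : Decidable (D_generate_pagination total current_offset limit) := by unfold D_generate_pagination; infer_instance

def Spec_generate_pagination (total : Int) (current_offset : Int) (limit : Int) (out : String) : Prop :=
  ¬ D_generate_pagination total current_offset limit → out = generate_pagination_alt total current_offset limit
instance (total : Int) (current_offset : Int) (limit : Int) (out : String) : Decidable (Spec_generate_pagination total current_offset limit out) := by unfold Spec_generate_pagination; infer_instance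

def pvDiffWitness_generate_pagination : Int × Int × Int := (-5, 0, 2)
def pvDiffWitnessOut_generate_pagination : String × String :=
  ("<ul class=\"pagination\"><li class=\"active\"><a href=\"#\">1</a></li>", "<ul class=\"pagination\">")

-- ===== CLAIM (what is proved, stated in full; the proofs are below) =====
def Claim_unchanged_generate_pagination : Prop := ∀ (total : Int) (current_offset : Int) (limit : Int), Dom_generate_pagination total current_offset limit → Pre_generate_pagination total current_offset limit → Spec_generate_pagination total current_offset limit (generate_pagination total current_offset limit)
def Claim_changed_generate_pagination : Prop := Dom_generate_pagination (pvDiffWitness_generate_pagination.1) (pvDiffWitness_generate_pagination.2.1) (pvDiffWitness_generate_pagination.2.2) ∧ Pre_generate_pagination (pvDiffWitness_generate_pagination.1) (pvDiffWitness_generate_pagination.2.1) (pvDiffWitness_generate_pagination.2.2) ∧ D_generate_pagination (pvDiffWitness_generate_pagination.1) (pvDiffWitness_generate_pagination.2.1) (pvDiffWitness_generate_pagination.2.2) ∧ generate_pagination (pvDiffWitness_generate_pagination.1) (pvDiffWitness_generate_pagination.2.1) (pvDiffWitness_generate_pagination.2.2) = pvDiffWitnessOut_generate_pagination.1 ∧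 generate_pagination_alt (pvDiffWitness_generate_pagination.1) (pvDiffWitness_generate_pagination.2.1) (pvDiffWitness_generate_pagination.2.2) = pvDiffWitnessOut_generate_pagination.2 ∧ pvDiffWitnessOut_generate_pagination.1 ≠ pvDiffWitnessOut_generate_pagination.2
def Claim_exact_generate_pagination : Prop := ∀ (total : Int) (current_offset : Int) (limit : Int), Dom_generate_pagination total current_offset limit → Pre_generate_pagination total current_offset limit → D_generate_pagination total current_offset limit → generate_pagination total current_offset limit ≠ generate_pagination_alt total current_offset limit

-- ===== LEMMAS AND PROOFS =====

-- A's per-page item: active on the interval test, else the inactive link at offset (n-1)*limit.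
def pvItemA (n : Int) (current_offset : Int) (limit : Int) : String :=
  if current_offset < n * limit ∧ n * limit ≤ current_offset + limit then
    pvActiveItem n
  else
    pvInactiveItem n limit

theorem pv_join_snoc (l : List String) (x : String) :
    String.join (l ++ [x]) = String.join l ++ x := by
  simp [String.join, List.foldl_append]

-- one loop step of A, entering with offset = (n-1)*limit, appends exactly pvItemA n
theorem pv_step_eq (co l : Int) (html : String) (n0 off n : Int) (hoff : off = (n - 1) * l) :
    pvStepA co l (html, n0, off) n = (html ++ pvItemA n co l, n, off + l) := by
  subst hoff
  simp only [pvStepA, pvItemA, pvActiveItem, pvInactiveItem, number_between]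
  split_ifs with h1 h2 <;> simp_all [String.append_assoc]

-- A's loop over range(1, k+1) starting from the initial state
theorem pv_foldA (co l : Int) (html : String) (k : Nat) :
    (PySem.List.pyRange 1 ((k : Int) + 1)).foldl (pvStepA co l) (html, 0, 0)
      = (html ++ String.join ((PySem.List.pyRange 1 ((k : Int) + 1)).map (fun n => pvItemA n co l)),
         if k = 0 then 0 else (k : Int), (k : Int) * l) := by
  induction k with
  | zero =>
      rw [show ((0 : Nat) : Int) + 1 = 1 by norm_num,
        PySem.List.pyRange_one_eq_nil (le_refl 1)]
      simp [String.join]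
  | succ k ih =>
      rw [show ((k + 1 : Nat) : Int) + 1 = ((k : Int) + 1) + 1 by push_cast; ring,
        PySem.List.pyRange_one_succ_right (by omega : (1 : Int) ≤ (k : Int) + 1),
        List.foldl_append, ih, List.map_append]
      simp only [List.foldl_cons, List.foldl_nil, List.map_cons, List.map_nil]
      rw [pv_join_snoc, pv_step_eq co l _ _ _ _ (by ring)]
      simp only [Prod.mk.injEq]
      refine ⟨String.append_assoc, by simp, by push_cast; ring⟩

-- the interval test holds iff limit is positive and n is the page after floor(co/limit)
theorem pv_active_iff (co l n : Int) (hl : l ≠ 0) :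
    (co < n * l ∧ n * l ≤ co + l) ↔ (0 < l ∧ n = PySem.Int.floordiv co l + 1) := by
  rcases lt_or_gt_of_ne hl with hneg | hpos
  · constructor
    · rintro ⟨h1, h2⟩
      exfalso
      have : co < co + l := lt_of_lt_of_le h1 h2
      omega
    · rintro ⟨h, _⟩; omega
  · have hiff : n = PySem.Int.floordiv co l + 1 ↔ PySem.Int.floordiv co l = n - 1 := by omega
    rw [hiff, PySem.Int.floordiv_eq_iff_of_pos hpos]
    have hm : (n - 1) * l = n * l - l := by ring
    have hm2 : (n - 1 + 1) * l = n * l := by ring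
    rw [hm, hm2]
    constructor
    · rintro ⟨h1, h2⟩; exact ⟨by omega, ⟨by omega, h1⟩⟩
    · rintro ⟨_, h1, h2⟩; exact ⟨h2, by omega⟩

-- B's staged item list equals the per-page itemA map
theorem pv_items_eq (co l : Int) (hl : l ≠ 0) (k : Nat) :
    (if 0 < l then
       (if 0 ≤ PySem.Int.floordiv co l ∧ PySem.Int.floordiv co l < (k : Int) then
          ((PySem.List.pyRange 1 ((k : Int) + 1)).map (fun n => pvInactiveItem n l)).set
            (PySem.Int.floordiv co l).toNat (pvActiveItem (PySem.Int.floordiv co l + 1))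
        else (PySem.List.pyRange 1 ((k : Int) + 1)).map (fun n => pvInactiveItem n l))
     else (PySem.List.pyRange 1 ((k : Int) + 1)).map (fun n => pvInactiveItem n l))
    = (PySem.List.pyRange 1 ((k : Int) + 1)).map (fun n => pvItemA n co l) := by
  by_cases hpos : 0 < l
  · rw [if_pos hpos]
    by_cases hin : 0 ≤ PySem.Int.floordiv co l ∧ PySem.Int.floordiv co l < (k : Int)
    · rw [if_pos hin]
      apply List.ext_getElem
      · simp [PySem.List.length_pyRange_one]
      · intro i h1 h2
        have hlen : ((PySem.List.pyRange 1 ((k : Int) + 1)).map (fun n => pvInactiveItem n l)).length = k := by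
          simp [PySem.List.length_pyRange_one]
        have hik : i < k := by
          simp only [List.length_set, hlen] at h1; exact h1
        rw [List.getElem_set]
        simp only [List.getElem_map, PySem.List.getElem_pyRange_one]
        rw [pvItemA]
        by_cases heq : (PySem.Int.floordiv co l).toNat = i
        · have hIco : (1 : Int) + i = PySem.Int.floordiv co l + 1 := by omega
          rw [if_pos heq,
            if_pos ((pv_active_iff co l ((1 : Int) + i) hl).mpr ⟨hpos, hIco⟩), hIco]
        · have hIco : ¬ ((1 : Int) + i = PySem.Int.floordiv co l + 1) := by omega
          rw [if_neg heq, if_neg]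
          intro hc
          exact hIco ((pv_active_iff co l ((1 : Int) + i) hl).mp hc).2
    · rw [if_neg hin]
      apply List.map_congr_left
      intro n hn
      rw [PySem.List.mem_pyRange_one] at hn
      rw [pvItemA, if_neg]
      intro hc
      have h2 := (pv_active_iff co l n hl).mp hc
      omega
  · rw [if_neg hpos]
    apply List.map_congr_left
    intro n hn
    rw [pvItemA, if_neg]
    intro hc
    exact hpos ((pv_active_iff co l n hl).mp hc).1

theorem pv_tdiv_zero_of_abs_lt (t l : Int) (h : t.natAbs < l.natAbs) : t.tdiv l = 0 := by
  have h2 : (t.tdiv l).natAbs = t.natAbs / l.natAbs := Int.natAbs_tdiv t l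
  rw [Nat.div_eq_of_lt h] at h2
  omega

theorem pv_q_nonneg (t co l : Int) (hl : l ≠ 0) (hnd : ¬ D_generate_pagination t co l)
    (hm : ¬ (l ∣ t)) : 0 ≤ t.tdiv l := by
  unfold D_generate_pagination at hnd
  push Not at hnd
  rcases (by omega : 0 ≤ t ∨ t < 0) with ht | ht <;> rcases (by omega : l < 0 ∨ 0 < l) with hl' | hl'
  · -- 0 ≤ t, l < 0
    have ht' : 0 < t := by
      rcases (by omega : 0 < t ∨ t = 0) with h | h
      · exact h
      · exact absurd (h ▸ Int.dvd_zero l) hm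
    have habs := hnd hm (Or.inl ⟨ht', hl'⟩)
    exact (pv_tdiv_zero_of_abs_lt t l (by omega)).ge
  · exact Int.tdiv_nonneg ht hl'.le
  · exact Int.tdiv_nonneg_of_nonpos_of_nonpos ht.le hl'.le
  · -- t < 0, 0 < l
    have habs := hnd hm (Or.inr ⟨ht, hl'⟩)
    exact (pv_tdiv_zero_of_abs_lt t l (by omega)).ge

theorem pv_q_neg (t co l : Int) (hd : D_generate_pagination t co l) : t.tdiv l < 0 := by
  obtain ⟨hdvd, hsign, habs⟩ := hd
  have hl : l ≠ 0 := by rcases hsign with ⟨_, h⟩ | ⟨_, h⟩ <;> omega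
  have hne : t.tdiv l ≠ 0 := by
    intro h
    have h2 : (t.tdiv l).natAbs = t.natAbs / l.natAbs := Int.natAbs_tdiv t l
    have h3 : 1 ≤ t.natAbs / l.natAbs := (Nat.one_le_div_iff (by omega)).mpr habs
    rw [h] at h2
    simp at h2
    omega
  have hle : t.tdiv l ≤ 0 := by
    rcases hsign with ⟨ht, hl'⟩ | ⟨ht, hl'⟩
    · exact Int.tdiv_nonpos_of_nonneg_of_nonpos ht.le hl'.le
    · have h0 : 0 ≤ (-t).tdiv l := Int.tdiv_nonneg (by omega) hl'.le
      rw [Int.neg_tdiv] at h0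
      omega
  omega

-- ===== VERDICT (by name: the statement is the Claim_ definition above) =====
theorem generate_pagination_spec : Claim_unchanged_generate_pagination := by
  intro t co l _ hpre
  unfold Spec_generate_pagination
  intro hnd
  have hl : l ≠ 0 := hpre
  simp only [generate_pagination, generate_pagination_alt, PySem.Int.truncdiv]
  by_cases hm : PySem.Int.mod t l = 0
  · simp only [hm, ne_eq, not_true_eq_false, if_false, add_zero]
    rcases (by omega : t.tdiv l ≤ 0 ∨ 0 < t.tdiv l) with hq | hq
    · rw [PySem.List.pyRange_one_eq_nil (by omega : t.tdiv l + 1 ≤ 1)]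
      simp [String.join]
    · have hk : (((t.tdiv l).toNat : Int)) = t.tdiv l := Int.toNat_of_nonneg hq.le
      rw [← hk, pv_foldA, pv_items_eq co l hl]
  · have hdvd : ¬ (l ∣ t) := fun h => hm ((PySem.Int.mod_eq_zero_iff_dvd t l).mpr h)
    have hq := pv_q_nonneg t co l hl hnd hdvd
    have hk : (((t.tdiv l).toNat : Int)) = t.tdiv l := Int.toNat_of_nonneg hq
    simp only [hm, ne_eq, not_false_eq_true, if_true]
    rw [← hk, pv_foldA]
    have hn : (if (t.tdiv l).toNat = 0 then (0 : Int) else ((t.tdiv l).toNat : Int)) + 1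
        = ((t.tdiv l).toNat : Int) + 1 := by split <;> omega
    rw [hn, pv_step_eq co l _ _ _ _
      (by ring : ((t.tdiv l).toNat : Int) * l = ((((t.tdiv l).toNat : Int) + 1) - 1) * l)]
    have hitems := pv_items_eq co l hl ((t.tdiv l).toNat + 1)
    push_cast at hitems
    rw [hitems]
    rw [PySem.List.pyRange_one_succ_right (by omega : (1 : Int) ≤ ((t.tdiv l).toNat : Int) + 1),
      List.map_append]
    simp only [List.map_cons, List.map_nil]
    rw [pv_join_snoc, ← String.append_assoc]

theorem generate_pagination_changed : Claim_changed_generate_pagination := by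
  unfold Claim_changed_generate_pagination; decide

theorem generate_pagination_tight : Claim_exact_generate_pagination := by
  intro t co l _ hpre hd
  have hm : PySem.Int.mod t l ≠ 0 := fun h => hd.1 ((PySem.Int.mod_eq_zero_iff_dvd t l).mp h)
  have hq := pv_q_neg t co l hd
  simp only [generate_pagination, generate_pagination_alt, PySem.Int.truncdiv]
  simp only [hm, ne_eq, not_false_eq_true, if_true]
  rw [PySem.List.pyRange_one_eq_nil (by omega : t.tdiv l + 1 ≤ 1),
    PySem.List.pyRange_one_eq_nil (by omega : (t.tdiv l + 1) + 1 ≤ 1)]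
  simp only [List.foldl_nil, List.map_nil]
  have hset : ¬ (0 ≤ PySem.Int.floordiv co l ∧ PySem.Int.floordiv co l < t.tdiv l + 1) := by
    rintro ⟨h1, h2⟩; omega
  rw [pv_step_eq co l _ _ _ _ (by ring : (0 : Int) = ((0 + 1) - 1) * l)]
  intro h
  have hB : (if 0 < l then
      (if 0 ≤ PySem.Int.floordiv co l ∧ PySem.Int.floordiv co l < t.tdiv l + 1 then
        ([] : List String).set (PySem.Int.floordiv co l).toNat (pvActiveItem (PySem.Int.floordiv co l + 1))
      else ([] : List String)) else ([] : List String)) = ([] : List String) := by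
    split_ifs <;> simp_all
  rw [hB] at h
  have hlit : 0 < ("<li class=\"active\"><a href=\"#\">" : String).length := by decide
  have hlit2 : 0 < ("<li><a href=\"?offset=" : String).length := by decide
  have hitem : 0 < (pvItemA (0 + 1) co l).length := by
    unfold pvItemA pvActiveItem pvInactiveItem
    split <;> simp only [String.length_append] <;> omega
  have hlen := congrArg String.length h
  simp only [String.length_append] at hlen
  have hjl : (String.join ([] : List String)).length = 0 := by decide
  rw [hjl] at hlen
  omega
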